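-- pv_equiv track=rewrite | github.com/atfox272/Simple-Torrent | sim/peer_4/peer_proc.py | get_prev_pieces_table
-- ===== SOURCE A (Python) =====
-- def get_prev_pieces_table(pieces_state_table, peers_num_remain, prev_remain_list):
--     pieces_state_table = ['completed' for _ in pieces_state_table]
--     for piece_id in range(0, len(pieces_state_table)):
--         if piece_id in prev_remain_list:
--             if peers_num_remain > 0:
--                 pieces_state_table[piece_id] = 'processing'
--                 peers_num_remain -= 1
--             else:
--                 pieces_state_table[piece_id] = 'pending'
--     return pieces_state_table
-- ===== SOURCE B (Python) =====
-- def get_prev_pieces_table(pieces_state_table, peers_num_remain, prev_remain_list):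
--     n = len(pieces_state_table)
--     valid = {x for x in prev_remain_list if 0 <= x < n}
--     processing = set(sorted(valid)[:max(peers_num_remain, 0)])
--     return ['processing' if i in processing else
--             'pending' if i in valid else
--             'completed' for i in range(n)]
-- ===== Notes on version B (the rewrite author's own statement) =====
-- stated objective: faster
-- what changed: Replaces A's linear scan with an O(n*m) inner membership test and a decrementing counter by building a hash set of in-range ids, sorting it once, and slicing off the first max(k,0) ids as the processing set; the output is then a direct per-index classification against two sets.
import Mathlib
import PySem

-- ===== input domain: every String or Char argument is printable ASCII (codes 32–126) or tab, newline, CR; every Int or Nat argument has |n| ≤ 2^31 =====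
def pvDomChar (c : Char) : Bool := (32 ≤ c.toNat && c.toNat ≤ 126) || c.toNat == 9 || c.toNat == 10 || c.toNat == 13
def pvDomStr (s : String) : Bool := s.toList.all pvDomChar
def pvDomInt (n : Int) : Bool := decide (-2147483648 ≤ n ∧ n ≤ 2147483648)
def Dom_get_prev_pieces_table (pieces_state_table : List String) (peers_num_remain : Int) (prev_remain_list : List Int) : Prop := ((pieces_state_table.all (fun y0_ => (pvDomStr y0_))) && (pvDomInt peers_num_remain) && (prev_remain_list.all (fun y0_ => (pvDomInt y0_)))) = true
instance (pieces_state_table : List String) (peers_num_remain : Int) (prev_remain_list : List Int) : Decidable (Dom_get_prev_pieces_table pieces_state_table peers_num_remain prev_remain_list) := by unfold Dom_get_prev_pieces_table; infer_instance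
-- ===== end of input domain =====

-- B replaces A's range scan with inner membership test and decrementing counter by
-- set-building + one sort + a slice for the processing ids; objective: faster (asymptotic).


-- ===== PORT A =====
-- A: one pass over range(n); a match gets 'processing' while the mutable budget is
-- positive (decrementing it), otherwise 'pending'.
def get_prev_pieces_table (pieces_state_table : List String) (peers_num_remain : Int) (prev_remain_list : List Int) : List String :=
  let t0 := pieces_state_table.map (fun _ => "completed")
  let res := (List.range t0.length).foldl
    (fun (st : List String × Int) (piece_id : Nat) =>
      if (piece_id : Int) ∈ prev_remain_list then
        if st.2 > 0 then (st.1.set piece_id "processing", st.2 - 1)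
        else (st.1.set piece_id "pending", st.2)
      else st)
    (t0, peers_num_remain)
  res.1

-- ===== PORT B =====
-- B: valid = set of in-range ids from prev_remain_list; processing = set of the first
-- max(k,0) ids of sorted(valid); output classifies each index against the two sets.
def get_prev_pieces_table_alt (pieces_state_table : List String) (peers_num_remain : Int) (prev_remain_list : List Int) : List String :=
  let n := pieces_state_table.length
  let valid : PySem.Set Int :=
    PySem.Set.ofList (prev_remain_list.filter (fun x => decide (0 ≤ x ∧ x < (n : Int))))
  let processing : PySem.Set Int :=
    PySem.Set.ofList (PySem.List.slice (PySem.List.sorted valid (fun x => x) false)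
      none (some (max peers_num_remain 0)))
  (List.range n).map (fun (i : Nat) =>
    if (i : Int) ∈ processing then "processing"
    else if (i : Int) ∈ valid then "pending"
    else "completed")

-- ===== PRECONDITION & SPEC =====
def Spec_get_prev_pieces_table (pieces_state_table : List String) (peers_num_remain : Int) (prev_remain_list : List Int) (out : List String) : Prop := out = get_prev_pieces_table_alt pieces_state_table peers_num_remain prev_remain_list
instance (pieces_state_table : List String) (peers_num_remain : Int) (prev_remain_list : List Int) (out : List String) : Decidable (Spec_get_prev_pieces_table pieces_state_table peers_num_remain prev_remain_list out) := by unfold Spec_get_prev_pieces_table; infer_instance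

-- ===== CLAIM (what is proved, stated in full; the proofs are below) =====
def Claim_equal_get_prev_pieces_table : Prop := ∀ (pieces_state_table : List String) (peers_num_remain : Int) (prev_remain_list : List Int), Dom_get_prev_pieces_table pieces_state_table peers_num_remain prev_remain_list → Spec_get_prev_pieces_table pieces_state_table peers_num_remain prev_remain_list (get_prev_pieces_table pieces_state_table peers_num_remain prev_remain_list)

-- ===== LEMMAS AND PROOFS =====

-- enumerate(xs) starting at m (intermediate form used only by the proof)
def pvEnumFrom (m : Nat) : List Nat → List (Nat × Nat)
  | [] => []
  | x :: xs => (m, x) :: pvEnumFrom (m + 1) xs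

-- A's budget after m matches, as a closed form of the initial budget k.
def pvBudget (k : Int) (m : Nat) : Int := k - min (m : Int) (max k 0)

theorem pvBudget_zero (k : Int) : pvBudget k 0 = k := by
  simp [pvBudget]

theorem pvBudget_pos_iff (k : Int) (m : Nat) : pvBudget k m > 0 ↔ (m : Int) < k := by
  unfold pvBudget; omega

theorem pvBudget_succ_lt (k : Int) (m : Nat) (h : (m : Int) < k) :
    pvBudget k m - 1 = pvBudget k (m + 1) := by
  unfold pvBudget; push_cast; omega

theorem pvBudget_succ_eq (k : Int) (m : Nat) (h : ¬ (m : Int) < k) :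
    pvBudget k m = pvBudget k (m + 1) := by
  unfold pvBudget; push_cast; omega

-- A's fold over any index list with budget pvBudget k m equals the rank-threshold fold
-- over the filtered indices enumerated from m.
theorem pv_core (prev_remain_list : List Int) (k : Int) :
    ∀ (is : List Nat) (l : List String) (m : Nat),
    ((is.foldl
      (fun (st : List String × Int) (piece_id : Nat) =>
        if (piece_id : Int) ∈ prev_remain_list then
          if st.2 > 0 then (st.1.set piece_id "processing", st.2 - 1)
          else (st.1.set piece_id "pending", st.2)
        else st)
      (l, pvBudget k m)).1)
    = (pvEnumFrom m (is.filter (fun (i : Nat) => decide ((i : Int) ∈ prev_remain_list)))).foldl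
        (fun (res : List String) (rp : Nat × Nat) =>
          res.set rp.2 (if (rp.1 : Int) < k then "processing" else "pending"))
        l := by
  intro is
  induction is with
  | nil => intro l m; simp [pvEnumFrom]
  | cons i is ih =>
    intro l m
    by_cases hm : (i : Int) ∈ prev_remain_list
    · by_cases hlt : (m : Int) < k
      · have hpos : pvBudget k m > 0 := (pvBudget_pos_iff k m).mpr hlt
        simp only [List.foldl_cons, List.filter_cons, hm, decide_true, if_true,
          if_pos hpos, pvEnumFrom, if_pos hlt]
        rw [pvBudget_succ_lt k m hlt]
        exact ih (l.set i "processing") (m + 1)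
      · have hpos : ¬ pvBudget k m > 0 := fun h => hlt ((pvBudget_pos_iff k m).mp h)
        simp only [List.foldl_cons, List.filter_cons, hm, decide_true, if_true,
          if_neg hpos, pvEnumFrom, if_neg hlt]
        rw [pvBudget_succ_eq k m hlt]
        exact ih (l.set i "pending") (m + 1)
    · simp only [List.foldl_cons, List.filter_cons, hm, decide_false, Bool.false_eq_true,
        if_false]
      exact ih l m

-- Pointwise value of the rank-threshold fold, for a strictly increasing id list.
theorem pv_fold_getElem (f : Nat → String) :
    ∀ (ps : List Nat) (l : List String) (m j : Nat), ps.Pairwise (· < ·) →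
    ((pvEnumFrom m ps).foldl (fun res rp => res.set rp.2 (f rp.1)) l)[j]? =
      (match ps.idxOf? j with
       | some idx => if j < l.length then some (f (m + idx)) else none
       | none => l[j]?) := by
  intro ps
  induction ps with
  | nil => intro l m j _; simp [pvEnumFrom, List.idxOf?]
  | cons p rest ih =>
    intro l m j hp
    have hrest : rest.Pairwise (· < ·) := hp.of_cons
    have hlt : ∀ q ∈ rest, p < q := fun q hq => List.rel_of_pairwise_cons hp hq
    simp only [pvEnumFrom, List.foldl_cons]
    rw [ih (l.set p (f m)) (m + 1) j hrest]
    by_cases hj : j = p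
    · subst hj
      have hnotin : rest.idxOf? j = none := by
        rw [List.idxOf?_eq_none_iff]
        intro hmem; exact absurd rfl (Nat.ne_of_lt (hlt j hmem))
      by_cases hjl : j < l.length
      · simp [hnotin, List.idxOf?_cons, hjl]
      · simp [hnotin, List.idxOf?_cons, hjl]
    · have hcons : (p :: rest).idxOf? j =
          (rest.idxOf? j).map (· + 1) := by
        simp [List.idxOf?_cons, Ne.symm hj]
      rw [hcons]
      cases hfind : rest.idxOf? j with
      | none =>
        simp only [Option.map_none]
        simp [List.getElem?_set_ne (fun h => hj h.symm)]
      | some idx =>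
        simp only [Option.map_some, List.length_set]
        have harith : m + 1 + idx = m + (idx + 1) := by omega
        rw [harith]

-- sorted(valid) is exactly the in-range qualifying ids in ascending order.
theorem pv_sorted_eq (n : Nat) (r : List Int) :
    PySem.List.sorted
      (PySem.Set.ofList (r.filter (fun x => decide (0 ≤ x ∧ x < (n : Int)))))
      (fun x => x) false
    = ((List.range n).filter (fun (i : Nat) => decide ((i : Int) ∈ r))).map (fun (i : Nat) => (i : Int)) := by
  set F := (List.range n).filter (fun (i : Nat) => decide ((i : Int) ∈ r)) with hF
  set V := PySem.Set.ofList (r.filter (fun x => decide (0 ≤ x ∧ x < (n : Int)))) with hV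
  have hFnd : F.Nodup := by rw [hF]; exact (List.nodup_range).filter _
  have hFpw : F.Pairwise (· < ·) := by rw [hF]; exact (List.pairwise_lt_range).filter _
  have hLnd : (F.map (fun (i : Nat) => (i : Int))).Nodup :=
    hFnd.map (fun a b h => by exact_mod_cast h)
  have hLpw : (F.map (fun (i : Nat) => (i : Int))).Pairwise (· < ·) := by
    refine hFpw.map _ ?_
    intro a b h; exact_mod_cast h
  have hmem : ∀ x : Int, x ∈ F.map (fun (i : Nat) => (i : Int)) ↔ x ∈ V := by
    intro x
    constructor
    · intro hx
      rcases List.mem_map.mp hx with ⟨i, hiF, rfl⟩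
      rw [hF] at hiF
      rcases List.mem_filter.mp hiF with ⟨hir, hmemr⟩
      rw [hV, PySem.Set.mem_ofList, List.mem_filter]
      refine ⟨by simpa using hmemr, ?_⟩
      have : i < n := List.mem_range.mp hir
      simp only [decide_eq_true_eq]
      exact ⟨by positivity, by exact_mod_cast this⟩
    · intro hx
      rw [hV, PySem.Set.mem_ofList, List.mem_filter] at hx
      rcases hx with ⟨hxr, hxb⟩
      simp only [decide_eq_true_eq] at hxb
      rcases hxb with ⟨h0, hn⟩
      refine List.mem_map.mpr ⟨x.toNat, ?_, by omega⟩
      rw [hF, List.mem_filter, List.mem_range]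
      constructor
      · omega
      · simp only [decide_eq_true_eq]
        have : ((x.toNat : Int)) = x := by omega
        rw [this]; exact hxr
  have hperm : (F.map (fun (i : Nat) => (i : Int))).Perm V := by
    rw [List.perm_ext_iff_of_nodup hLnd (PySem.Set.nodup_ofList _)]
    exact hmem
  exact PySem.List.sorted_eq_of_perm_of_pairwise_lt V (F.map (fun (i : Nat) => (i : Int))) (fun x => x) hperm hLpw

-- In a strictly increasing list, membership in the first b elements is rank < b.
theorem pv_mem_take_iff (ps : List Nat) (hp : ps.Pairwise (· < ·)) (j idx b : Nat)
    (hidx : ps.idxOf? j = some idx) : j ∈ ps.take b ↔ idx < b := by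
  rcases List.idxOf?_eq_some_iff.mp hidx with ⟨hlen, hget, _⟩
  have hnd : ps.Nodup := hp.nodup
  constructor
  · intro hmem
    rcases List.mem_take_iff_getElem.mp hmem with ⟨i, hi, hgi⟩
    have hi' : i < ps.length := by omega
    have heq : i = idx := (List.Nodup.getElem_inj_iff hnd (hi := hi') (hj := hlen)).mp
      (by rw [hgi, hget])
    omega
  · intro hb
    exact List.mem_take_iff_getElem.mpr ⟨idx, by omega, hget⟩

-- ===== VERDICT (by name: the statement is the Claim_ definition above) =====
theorem get_prev_pieces_table_spec : Claim_equal_get_prev_pieces_table := by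
  intro t k r _
  unfold Spec_get_prev_pieces_table get_prev_pieces_table get_prev_pieces_table_alt
  simp only [List.length_map]
  have hA := pv_core r k (List.range t.length) (t.map fun _ => "completed") 0
  rw [pvBudget_zero] at hA
  rw [hA]
  set n := t.length with hn
  set F := (List.range n).filter (fun (i : Nat) => decide ((i : Int) ∈ r)) with hF
  have hFpw : F.Pairwise (· < ·) := (List.pairwise_lt_range).filter _
  set V := PySem.Set.ofList (r.filter (fun x => decide (0 ≤ x ∧ x < (n : Int)))) with hV
  have hsorted := pv_sorted_eq n r
  rw [← hF, ← hV] at hsorted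
  set b := max k 0 with hb
  have hslice : PySem.List.slice (PySem.List.sorted V (fun x => x) false) none (some b) =
      (F.map (fun (i : Nat) => (i : Int))).take b.toNat := by
    rw [hsorted, PySem.List.slice_to _ (by omega)]
  set l0 := t.map (fun _ => "completed") with hl0
  have hl0len : l0.length = n := by simp [hl0, hn]
  have hl0get : ∀ j, j < n → l0[j]? = some "completed" := by
    intro j hj
    rw [hl0]
    rw [List.getElem?_map]
    have : j < t.length := by omega
    simp [List.getElem?_eq_getElem this]
  apply List.ext_getElem?
  intro j
  rw [pv_fold_getElem (fun rank => if (rank : Int) < k then "processing" else "pending") F l0 0 j hFpw]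
  rw [List.getElem?_map]
  by_cases hjn : j < n
  · have hrange : (List.range n)[j]? = some j := by
      simp [List.getElem?_range hjn]
    rw [List.getElem?_map, hrange]
    simp only [Option.map_some]
    have hmemV : (j : Int) ∈ V ↔ j ∈ F := by
      rw [hV, PySem.Set.mem_ofList, List.mem_filter, hF, List.mem_filter, List.mem_range]
      constructor
      · intro ⟨h1, h2⟩
        simp only [decide_eq_true_eq] at h2
        exact ⟨by exact_mod_cast h2.2, by simpa using h1⟩
      · intro ⟨h1, h2⟩
        simp only [decide_eq_true_eq] at h2 ⊢
        exact ⟨by simpa using h2, ⟨by positivity, by exact_mod_cast h1⟩⟩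
    have hmemP : (j : Int) ∈ PySem.Set.ofList
        (PySem.List.slice (PySem.List.sorted V (fun x => x) false) none (some b)) ↔
        j ∈ F.take b.toNat := by
      rw [PySem.Set.mem_ofList, hslice, ← List.map_take, List.mem_map]
      constructor
      · rintro ⟨i, hi, hcast⟩
        have : i = j := by exact_mod_cast hcast
        rwa [this] at hi
      · intro hj; exact ⟨j, hj, rfl⟩
    by_cases hjF : j ∈ F
    · cases hidx : F.idxOf? j with
      | none => exact absurd hjF (List.idxOf?_eq_none_iff.mp hidx)
      | some idx =>
      have hjtake : j ∈ F.take b.toNat ↔ idx < b.toNat := pv_mem_take_iff F hFpw j idx b.toNat hidx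
      have hidxlt : idx < b.toNat ↔ (idx : Int) < k := by rw [hb]; omega
      simp only [hl0len, hjn, if_true, Nat.zero_add]
      by_cases hk : (idx : Int) < k
      · have : (j : Int) ∈ PySem.Set.ofList
            (PySem.List.slice (PySem.List.sorted V (fun x => x) false) none (some b)) :=
          hmemP.mpr (hjtake.mpr (hidxlt.mpr hk))
        simp [this, hk]
      · have : ¬ (j : Int) ∈ PySem.Set.ofList
            (PySem.List.slice (PySem.List.sorted V (fun x => x) false) none (some b)) := by
          intro h
          exact hk (hidxlt.mp (hjtake.mp (hmemP.mp h)))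
        simp [this, hk, hmemV.mpr hjF]
    · have hnone : F.idxOf? j = none := List.idxOf?_eq_none_iff.mpr hjF
      rw [hnone]
      have hnotP : ¬ (j : Int) ∈ PySem.Set.ofList
          (PySem.List.slice (PySem.List.sorted V (fun x => x) false) none (some b)) := by
        intro h
        exact hjF (List.mem_of_mem_take (hmemP.mp h))
      have hnotV : ¬ (j : Int) ∈ V := fun h => hjF (hmemV.mp h)
      have ht : t[j]? = some t[j] := List.getElem?_eq_getElem (hn ▸ hjn)
      simp [ht, hnotP, hnotV]
  · have hrange : (List.range n)[j]? = none := by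
      rw [List.getElem?_eq_none_iff]
      simpa using hjn
    rw [List.getElem?_map, hrange]
    simp only [Option.map_none]
    cases hfind : F.idxOf? j with
    | some idx => simp [hl0len, hjn]
    | none =>
      have ht : t[j]? = none := by rw [List.getElem?_eq_none_iff, ← hn]; omega
      simp [ht]
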